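-- pv_equiv track=rewrite | github.com/sjperkins/awkward-1.0 | dev/generate-cuda.py | gettemplateargs
-- ===== SOURCE A (Python) =====
-- def gettemplateargs(spec):
--     templateargs = {}
--     if "specializations" in spec.keys():
--         typelist = []
--         count = 0
--         templascii = 65
--         for childfunc in spec["specializations"]:
--             for i in range(len(childfunc["args"])):
--                 if len(typelist) < i + 1:
--                     typelist.append(list(childfunc["args"][i].values())[0])
--                 else:
--                     if typelist[i] != list(childfunc["args"][i].values())[0]:
--                         templateargs[list(childfunc["args"][i].keys())[0]] = chr(
--                             templascii
--                         )
--                         count += 1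
--                         templascii += 1
--     return templateargs
-- ===== SOURCE B (Python) =====
-- def gettemplateargs(spec):
--     templateargs = {}
--     if "specializations" in spec:
--         occ = [(i, arg)
--                for childfunc in spec["specializations"]
--                for i, arg in enumerate(childfunc["args"])]
--         ref = {}
--         for i, arg in occ:
--             ref.setdefault(i, next(iter(arg.values())))
--         code = 65
--         for i, arg in occ:
--             if next(iter(arg.values())) != ref[i]:
--                 templateargs[next(iter(arg))] = chr(code)
--                 code += 1
--     return templateargs
-- ===== Notes on version B (the rewrite author's own statement) =====
-- stated objective: alternative
-- what changed: A's single interleaved pass that lazily appends to a reference typelist while emitting template letters is replaced by a flattened (index, arg) occurrence list, a setdefault pass that builds the per-index reference dict, and a separate emission pass over the same occurrences.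
-- outside the precondition, e.g. on gettemplateargs({'specializations': [{'noargs': []}]}): A raises KeyError, B raises KeyError; on gettemplateargs({'specializations': [{'args': [{}]}]}): A raises IndexError, B raises StopIteration
import Mathlib
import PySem

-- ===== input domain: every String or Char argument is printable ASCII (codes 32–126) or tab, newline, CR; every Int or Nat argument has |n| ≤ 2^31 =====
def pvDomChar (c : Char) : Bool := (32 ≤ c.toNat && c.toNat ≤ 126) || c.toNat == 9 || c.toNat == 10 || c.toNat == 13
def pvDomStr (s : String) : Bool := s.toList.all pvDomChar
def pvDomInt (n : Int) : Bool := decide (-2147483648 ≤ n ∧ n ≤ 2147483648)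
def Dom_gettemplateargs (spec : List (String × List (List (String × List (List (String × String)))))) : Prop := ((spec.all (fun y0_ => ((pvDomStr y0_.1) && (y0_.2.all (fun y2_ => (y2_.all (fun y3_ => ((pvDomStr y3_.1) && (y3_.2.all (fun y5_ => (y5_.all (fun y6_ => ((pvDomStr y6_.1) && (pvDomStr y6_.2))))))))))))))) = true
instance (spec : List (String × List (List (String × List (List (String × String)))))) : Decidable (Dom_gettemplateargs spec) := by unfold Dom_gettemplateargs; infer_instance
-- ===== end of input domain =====

-- B replaces A's single interleaved pass (lazy-append reference typelist mixed with letter emission)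
-- by a flattened occurrence list, a setdefault pass building the per-index reference dict, and one
-- emission pass over the same occurrences (objective: alternative decomposition, same cost).

-- ===== PORT A =====
-- list(d.values())[0] / list(d.keys())[0] of a (nonempty, under Pre_) Python dict given as pairs
def pvFirstVal (arg : List (String × String)) : String :=
  ((PySem.Dict.ofList arg).values).headD ""
def pvFirstKey (arg : List (String × String)) : String :=
  ((PySem.Dict.ofList arg).keys).headD ""

-- the body of A's inner loop, on state (templateargs, typelist, count, templascii)
def pvStepA (st : PySem.Dict String String × List String × Int × Int)
    (p : Int × List (String × String)) :
    PySem.Dict String String × List String × Int × Int :=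
  if (st.2.1.length : Int) < p.1 + 1 then
    (st.1, st.2.1 ++ [pvFirstVal p.2], st.2.2.1, st.2.2.2)
  else
    if PySem.List.pyGetD st.2.1 p.1 "" ≠ pvFirstVal p.2 then
      (st.1.insert (pvFirstKey p.2) (String.ofList [Char.ofNat st.2.2.2.toNat]),
       st.2.1, st.2.2.1 + 1, st.2.2.2 + 1)
    else st

def gettemplateargs (spec : List (String × List (List (String × List (List (String × String)))))) : List (String × String) :=
  let specd := PySem.Dict.ofList spec
  if specd.contains "specializations" then
    let st := (specd.getD "specializations" []).foldl
      (fun st cf =>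
        let args := (PySem.Dict.ofList cf).getD "args" []
        (PySem.List.pyRange 0 args.length 1).foldl
          (fun st i => pvStepA st (i, PySem.List.pyGetD args i [])) st)
      (PySem.Dict.empty, ([] : List String), (0 : Int), (65 : Int))
    st.1.items
  else (PySem.Dict.empty : PySem.Dict String String).items

-- ===== PORT B =====
def pvStepRef (d : PySem.Dict Int String) (p : Int × List (String × String)) : PySem.Dict Int String :=
  d.setdefault p.1 (pvFirstVal p.2)

def pvStepB (ref : PySem.Dict Int String) (st : PySem.Dict String String × Int)
    (p : Int × List (String × String)) : PySem.Dict String String × Int :=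
  if pvFirstVal p.2 ≠ ref.getD p.1 "" then
    (st.1.insert (pvFirstKey p.2) (String.ofList [Char.ofNat st.2.toNat]), st.2 + 1)
  else st

def gettemplateargs_alt (spec : List (String × List (List (String × List (List (String × String)))))) : List (String × String) :=
  match (PySem.Dict.ofList spec).get? "specializations" with
  | none => []
  | some cfs =>
    let occ := cfs.flatMap (fun cf => PySem.List.enumerate ((PySem.Dict.ofList cf).getD "args" []) 0)
    let ref := occ.foldl pvStepRef PySem.Dict.empty
    let out := occ.foldl (pvStepB ref) (PySem.Dict.empty, (65 : Int))
    out.1.items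

-- ===== PRECONDITION & SPEC =====
-- Pre_ excludes exactly the inputs where the Python A raises: a specialization dict without an
-- "args" key (KeyError) or an empty argument dict (IndexError on list(d.values())[0]).
def Pre_gettemplateargs (spec : List (String × List (List (String × List (List (String × String)))))) : Prop :=
  ∀ cf ∈ (PySem.Dict.ofList spec).getD "specializations" [],
    (PySem.Dict.ofList cf).contains "args" = true ∧
    ∀ arg ∈ (PySem.Dict.ofList cf).getD "args" [], arg ≠ []

instance (spec : List (String × List (List (String × List (List (String × String)))))) : Decidable (Pre_gettemplateargs spec) := by
  unfold Pre_gettemplateargs; infer_instance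

def pvWitness_gettemplateargs : (List (String × List (List (String × List (List (String × String)))))) :=
  [("specializations", [[("args", [[("T", "int")], [("U", "float")]])], [("args", [[("T", "int")], [("U", "double")]])]])]

def Spec_gettemplateargs (spec : List (String × List (List (String × List (List (String × String)))))) (out : List (String × String)) : Prop := out = gettemplateargs_alt spec
instance (spec : List (String × List (List (String × List (List (String × String)))))) (out : List (String × String)) : Decidable (Spec_gettemplateargs spec out) := by unfold Spec_gettemplateargs; infer_instance

-- ===== CLAIM (what is proved, stated in full; the proofs are below) =====
def Claim_equal_gettemplateargs : Prop := ∀ (spec : List (String × List (List (String × List (List (String × String)))))), Dom_gettemplateargs spec → Pre_gettemplateargs spec → Spec_gettemplateargs spec (gettemplateargs spec)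

-- ===== LEMMAS AND PROOFS =====

-- the typelist evolution of A's loop, isolated
def pvTLStep (tl : List String) (p : Int × List (String × String)) : List String :=
  if (tl.length : Int) < p.1 + 1 then tl ++ [pvFirstVal p.2] else tl

-- B's emission step with a plain list as the reference (proof oracle)
def pvStepBL (R : List String) (st : PySem.Dict String String × Int)
    (p : Int × List (String × String)) : PySem.Dict String String × Int :=
  if pvFirstVal p.2 ≠ R.getD p.1.toNat "" then
    (st.1.insert (pvFirstKey p.2) (String.ofList [Char.ofNat st.2.toNat]), st.2 + 1)
  else st

theorem pvTLStep_prefix (tl : List String) (p : Int × List (String × String)) :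
    tl <+: pvTLStep tl p := by
  unfold pvTLStep; split
  · exact ⟨[pvFirstVal p.2], rfl⟩
  · exact List.prefix_refl tl

theorem pvFoldTL_prefix (l : List (Int × List (String × String))) (tl : List String) :
    tl <+: l.foldl pvTLStep tl := by
  induction l generalizing tl with
  | nil => exact List.prefix_refl tl
  | cons p l ih => exact (pvTLStep_prefix tl p).trans (ih (pvTLStep tl p))

theorem pvGetD_snoc (tl : List String) (v d : String) : (tl ++ [v]).getD tl.length d = v := by
  simp [List.getD_eq_getElem?_getD]

theorem pvGetD_of_prefix (tl R : List String) (n : Nat) (d : String)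
    (h : tl <+: R) (hn : n < tl.length) : R.getD n d = tl.getD n d := by
  obtain ⟨t, ht⟩ := h
  subst ht
  exact List.getD_append _ _ _ _ hn

-- A's fold over one consecutive-index block agrees with the oracle fold, provided the final
-- typelist is a prefix of the oracle R and indices start at j ≤ |tl|.
theorem pvInner (args : List (List (String × String))) : ∀ (j : Nat) (tl : List String)
    (ta : PySem.Dict String String) (cnt tc : Int) (R : List String),
    j ≤ tl.length →
    (PySem.List.enumerate args (j : Int)).foldl pvTLStep tl <+: R →
    (PySem.List.enumerate args (j : Int)).foldl pvStepA (ta, tl, cnt, tc) =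
      (((PySem.List.enumerate args (j : Int)).foldl (pvStepBL R) (ta, tc)).1,
        (PySem.List.enumerate args (j : Int)).foldl pvTLStep tl,
        cnt + (((PySem.List.enumerate args (j : Int)).foldl (pvStepBL R) (ta, tc)).2 - tc),
        ((PySem.List.enumerate args (j : Int)).foldl (pvStepBL R) (ta, tc)).2) := by
  induction args with
  | nil => intro j tl ta cnt tc R hj hR; simp [PySem.List.enumerate_nil]
  | cons a args ih =>
    intro j tl ta cnt tc R hj hR
    rw [PySem.List.enumerate_cons] at hR ⊢
    simp only [List.foldl_cons] at hR ⊢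
    have hcast : ((j : Int) + 1) = ((j + 1 : Nat) : Int) := by push_cast; ring
    rcases Nat.lt_or_eq_of_le hj with hlt | heq
    · -- j < tl.length : compare branch, typelist unchanged
      have hguard : ¬ ((tl.length : Int) < (j : Int) + 1) := by omega
      have htl : pvTLStep tl ((j : Int), a) = tl := by simp [pvTLStep, hguard]
      rw [htl] at hR ⊢
      have htlR : tl <+: R := (pvFoldTL_prefix _ tl).trans hR
      have hget : PySem.List.pyGetD tl ((j : Int)) "" = R.getD j "" := by
        rw [PySem.List.pyGetD_natCast, pvGetD_of_prefix tl R j "" htlR hlt]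
      have htn : ((j : Int)).toNat = j := Int.toNat_natCast j
      by_cases hemit : pvFirstVal a = R.getD j ""
      · have hA : pvStepA (ta, tl, cnt, tc) ((j : Int), a) = (ta, tl, cnt, tc) := by
          unfold pvStepA
          rw [if_neg hguard, if_neg (by rw [hget, hemit]; exact fun h => h rfl)]
        have hB : pvStepBL R (ta, tc) ((j : Int), a) = (ta, tc) := by
          unfold pvStepBL
          rw [htn, if_neg (fun h => h hemit)]
        rw [hA, hB, hcast] at *
        exact ih (j + 1) tl _ _ _ R (by omega) hR
      · have hA : pvStepA (ta, tl, cnt, tc) ((j : Int), a) =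
            (ta.insert (pvFirstKey a) (String.ofList [Char.ofNat tc.toNat]), tl, cnt + 1, tc + 1) := by
          unfold pvStepA
          rw [if_neg hguard, if_pos (by rw [hget]; exact fun h => hemit h.symm)]
        have hB : pvStepBL R (ta, tc) ((j : Int), a) =
            (ta.insert (pvFirstKey a) (String.ofList [Char.ofNat tc.toNat]), tc + 1) := by
          unfold pvStepBL
          rw [htn, if_pos hemit]
        rw [hA, hB, hcast] at *
        rcases hE : (PySem.List.enumerate args ((j + 1 : Nat) : Int)).foldl (pvStepBL R)
            (ta.insert (pvFirstKey a) (String.ofList [Char.ofNat tc.toNat]), tc + 1) with ⟨d1, t1⟩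
        have := ih (j + 1) tl (ta.insert (pvFirstKey a) (String.ofList [Char.ofNat tc.toNat]))
          (cnt + 1) (tc + 1) R (by omega) hR
        rw [hE] at this
        rw [this]
        simp only [Prod.mk.injEq, true_and, and_true]
        ring
    · -- j = tl.length : append branch, no emission on either side
      have hguard : ((tl.length : Int) < (j : Int) + 1) := by omega
      have htl : pvTLStep tl ((j : Int), a) = tl ++ [pvFirstVal a] := by simp [pvTLStep, hguard]
      rw [htl] at hR ⊢
      have hpref : tl ++ [pvFirstVal a] <+: R := (pvFoldTL_prefix _ _).trans hR
      have hval : R.getD j "" = pvFirstVal a := by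
        rw [heq]
        have h2 := pvGetD_of_prefix (tl ++ [pvFirstVal a]) R tl.length "" hpref (by simp)
        rw [h2, pvGetD_snoc]
      have htn : ((j : Int)).toNat = j := Int.toNat_natCast j
      have hA : pvStepA (ta, tl, cnt, tc) ((j : Int), a) =
          (ta, tl ++ [pvFirstVal a], cnt, tc) := by
        unfold pvStepA
        rw [if_pos hguard]
      have hB : pvStepBL R (ta, tc) ((j : Int), a) = (ta, tc) := by
        unfold pvStepBL
        rw [htn, if_neg (fun h => h hval.symm)]
      rw [hA, hB, hcast] at *
      exact ih (j + 1) (tl ++ [pvFirstVal a]) _ _ _ R (by simp; omega) hR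

-- fold over a flatMap is the nested fold
theorem pvFoldlFlatMap {α β σ : Type} (l : List α) (g : α → List β) (f : σ → β → σ) (s : σ) :
    (l.flatMap g).foldl f s = l.foldl (fun s x => (g x).foldl f s) s := by
  induction l generalizing s with
  | nil => rfl
  | cons x l ih => simp [List.flatMap_cons, List.foldl_append, ih]

-- outer: over the flattened occurrence list
theorem pvOuter (argss : List (List (List (String × String)))) : ∀ (tl : List String)
    (ta : PySem.Dict String String) (cnt tc : Int) (R : List String),
    (argss.flatMap (fun args => PySem.List.enumerate args 0)).foldl pvTLStep tl <+: R →
    (argss.flatMap (fun args => PySem.List.enumerate args 0)).foldl pvStepA (ta, tl, cnt, tc) =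
      (((argss.flatMap (fun args => PySem.List.enumerate args 0)).foldl (pvStepBL R) (ta, tc)).1,
       (argss.flatMap (fun args => PySem.List.enumerate args 0)).foldl pvTLStep tl,
       cnt + (((argss.flatMap (fun args => PySem.List.enumerate args 0)).foldl (pvStepBL R) (ta, tc)).2 - tc),
       ((argss.flatMap (fun args => PySem.List.enumerate args 0)).foldl (pvStepBL R) (ta, tc)).2) := by
  induction argss with
  | nil => intro tl ta cnt tc R hR; simp
  | cons args argss ih =>
    intro tl ta cnt tc R hR
    simp only [List.flatMap_cons, List.foldl_append] at hR ⊢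
    have h0 : ((0 : Nat) : Int) = (0 : Int) := by norm_num
    have hRin : (PySem.List.enumerate args 0).foldl pvTLStep tl <+: R :=
      (pvFoldTL_prefix _ _).trans hR
    rcases hE : (PySem.List.enumerate args 0).foldl (pvStepBL R) (ta, tc) with ⟨d1, t1⟩
    have hin := pvInner args 0 tl ta cnt tc R (Nat.zero_le _) (by rw [h0]; exact hRin)
    rw [h0, hE] at hin
    rw [hin]
    have hrest := ih ((PySem.List.enumerate args 0).foldl pvTLStep tl) d1
      (cnt + (t1 - tc)) t1 R hR
    rw [hrest]
    simp only [Prod.mk.injEq, true_and, and_true]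
    ring

-- the reference dict built by setdefault looks up exactly like the typelist (one block)
theorem pvRefInner (args : List (List (String × String))) : ∀ (j : Nat) (tl : List String)
    (d : PySem.Dict Int String),
    j ≤ tl.length →
    (∀ i : Int, d.get? i = if 0 ≤ i ∧ i.toNat < tl.length then some (tl.getD i.toNat "") else none) →
    ∀ i : Int, ((PySem.List.enumerate args (j : Int)).foldl pvStepRef d).get? i =
      (if 0 ≤ i ∧ i.toNat < ((PySem.List.enumerate args (j : Int)).foldl pvTLStep tl).length
       then some (((PySem.List.enumerate args (j : Int)).foldl pvTLStep tl).getD i.toNat "")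
       else none) := by
  induction args with
  | nil => intro j tl d _ hd i; simpa [PySem.List.enumerate_nil] using hd i
  | cons a args ih =>
    intro j tl d hj hd i
    rw [PySem.List.enumerate_cons]
    simp only [List.foldl_cons]
    have hcast : ((j : Int) + 1) = ((j + 1 : Nat) : Int) := by push_cast; ring
    rcases Nat.lt_or_eq_of_le hj with hlt | heq
    · have hguard : ¬ ((tl.length : Int) < (j : Int) + 1) := by omega
      have htl : pvTLStep tl ((j : Int), a) = tl := by simp [pvTLStep, hguard]
      have hcont : d.contains ((j : Int)) = true := by
        rw [PySem.Dict.contains_eq_isSome_get?, hd ((j : Int)), if_pos (by omega)]; rfl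
      have hsd : pvStepRef d ((j : Int), a) = d := PySem.Dict.setdefault_of_contains d _ hcont
      rw [htl, hsd, hcast]
      exact ih (j + 1) tl d (by omega) hd i
    · have hguard : ((tl.length : Int) < (j : Int) + 1) := by omega
      have htl : pvTLStep tl ((j : Int), a) = tl ++ [pvFirstVal a] := by simp [pvTLStep, hguard]
      have hnone : d.get? ((j : Int)) = none := by
        rw [hd ((j : Int)), if_neg (by omega)]
      have hcont : d.contains ((j : Int)) = false := by
        rw [PySem.Dict.contains_eq_isSome_get?, hnone]; rfl
      have hsd : pvStepRef d ((j : Int), a) = d.insert ((j : Int)) (pvFirstVal a) :=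
        PySem.Dict.setdefault_of_not_contains d _ hcont
      rw [htl, hsd, hcast]
      refine ih (j + 1) (tl ++ [pvFirstVal a]) _ (by simp; omega) ?_ i
      intro i'
      by_cases hij : i' = (j : Int)
      · subst hij
        rw [PySem.Dict.get?_insert_self, if_pos (by simp; omega)]
        congr 1
        rw [Int.toNat_natCast, heq, pvGetD_snoc]
      · rw [PySem.Dict.get?_insert_of_ne d (pvFirstVal a) hij, hd i']
        by_cases h1 : 0 ≤ i' ∧ i'.toNat < tl.length
        · rw [if_pos h1, if_pos (by simp; omega)]
          congr 1
          exact (List.getD_append _ _ _ _ h1.2).symm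
        · rw [if_neg h1, if_neg (by simp; omega)]

-- the reference dict over the whole flattened occurrence list
theorem pvRefDict (argss : List (List (List (String × String)))) : ∀ (tl : List String)
    (d : PySem.Dict Int String),
    (∀ i : Int, d.get? i = if 0 ≤ i ∧ i.toNat < tl.length then some (tl.getD i.toNat "") else none) →
    ∀ i : Int,
      ((argss.flatMap (fun args => PySem.List.enumerate args 0)).foldl pvStepRef d).get? i =
      (if 0 ≤ i ∧ i.toNat < ((argss.flatMap (fun args => PySem.List.enumerate args 0)).foldl pvTLStep tl).length
       then some (((argss.flatMap (fun args => PySem.List.enumerate args 0)).foldl pvTLStep tl).getD i.toNat "")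
       else none) := by
  induction argss with
  | nil => intro tl d hd i; simpa using hd i
  | cons args argss ih =>
    intro tl d hd i
    simp only [List.flatMap_cons, List.foldl_append]
    have h0 : ((0 : Nat) : Int) = (0 : Int) := by norm_num
    have hblk := pvRefInner args 0 tl d (Nat.zero_le _) hd
    rw [h0] at hblk
    exact ih ((PySem.List.enumerate args 0).foldl pvTLStep tl)
      ((PySem.List.enumerate args 0).foldl pvStepRef d) hblk i

-- the typelist grows to cover every index of a block
theorem pvTLlen (args : List (List (String × String))) : ∀ (j : Nat) (tl : List String),
    j ≤ tl.length →
    args.length + j ≤ ((PySem.List.enumerate args (j : Int)).foldl pvTLStep tl).length := by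
  induction args with
  | nil => intro j tl hj; simp [PySem.List.enumerate_nil]; omega
  | cons a args ih =>
    intro j tl hj
    rw [PySem.List.enumerate_cons]
    simp only [List.foldl_cons]
    have hcast : ((j : Int) + 1) = ((j + 1 : Nat) : Int) := by push_cast; ring
    rcases Nat.lt_or_eq_of_le hj with hlt | heq
    · have hguard : ¬ ((tl.length : Int) < (j : Int) + 1) := by omega
      have htl : pvTLStep tl ((j : Int), a) = tl := by simp [pvTLStep, hguard]
      rw [htl, hcast]
      have := ih (j + 1) tl (by omega)
      simp only [List.length_cons]
      omega
    · have hguard : ((tl.length : Int) < (j : Int) + 1) := by omega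
      have htl : pvTLStep tl ((j : Int), a) = tl ++ [pvFirstVal a] := by simp [pvTLStep, hguard]
      rw [htl, hcast]
      have := ih (j + 1) (tl ++ [pvFirstVal a]) (by simp; omega)
      simp only [List.length_cons]
      omega

-- every occurrence index lies below the final typelist length
theorem pvIdxLt (argss : List (List (List (String × String)))) (tl : List String)
    (p : Int × List (String × String))
    (hp : p ∈ argss.flatMap (fun args => PySem.List.enumerate args 0)) :
    0 ≤ p.1 ∧ p.1.toNat < ((argss.flatMap (fun args => PySem.List.enumerate args 0)).foldl pvTLStep tl).length := by
  obtain ⟨args, hargs, hpm⟩ := List.mem_flatMap.1 hp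
  obtain ⟨k, hk, hpk⟩ := (PySem.List.mem_enumerate_iff args 0 p).1 hpm
  obtain ⟨s, t, hst⟩ := List.append_of_mem hargs
  subst hst
  have h0 : ((0 : Nat) : Int) = (0 : Int) := by norm_num
  have hp1 : p.1 = (k : Int) := by rw [hpk]; simp
  simp only [List.flatMap_append, List.flatMap_cons, List.foldl_append]
  have hblk := pvTLlen args 0 ((s.flatMap (fun args => PySem.List.enumerate args 0)).foldl pvTLStep tl) (Nat.zero_le _)
  rw [h0] at hblk
  have hmono := (pvFoldTL_prefix (t.flatMap (fun args => PySem.List.enumerate args 0))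
    ((PySem.List.enumerate args 0).foldl pvTLStep ((s.flatMap (fun args => PySem.List.enumerate args 0)).foldl pvTLStep tl))).length_le
  rw [hp1]
  constructor
  · omega
  · rw [Int.toNat_natCast]
    omega

-- A's inner pyRange-indexing loop is the fold over the enumerated args
theorem pvInnerEnum (xs : List (List (String × String)))
    (st : PySem.Dict String String × List String × Int × Int) :
    (PySem.List.pyRange 0 xs.length 1).foldl
      (fun st i => pvStepA st (i, PySem.List.pyGetD xs i [])) st =
    (PySem.List.enumerate xs 0).foldl pvStepA st := by
  rw [PySem.List.enumerate_eq_map_pyRange xs [], List.foldl_map]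
  simp [PySem.List.len]

-- ===== VERDICT (by name: the statement is the Claim_ definition above) =====
theorem gettemplateargs_spec : Claim_equal_gettemplateargs := by
  intro spec _hdom _hpre
  unfold Spec_gettemplateargs gettemplateargs gettemplateargs_alt
  cases hget : (PySem.Dict.ofList spec).get? "specializations" with
  | none =>
    have hc : (PySem.Dict.ofList spec).contains "specializations" = false := by
      rw [PySem.Dict.contains_eq_isSome_get?, hget]; rfl
    simp [hc]
    rfl
  | some cfs =>
    have hc : (PySem.Dict.ofList spec).contains "specializations" = true := by
      rw [PySem.Dict.contains_eq_isSome_get?, hget]; rfl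
    have hgd : (PySem.Dict.ofList spec).getD "specializations" [] = cfs :=
      PySem.Dict.getD_of_get?_eq_some _ _ hget
    simp only [hc, if_true, hgd]
    -- rewrite A's nested loops into one fold over the flattened occurrence list
    have hA1 : cfs.foldl
        (fun st cf =>
          (PySem.List.pyRange 0 ((PySem.Dict.ofList cf).getD "args" []).length 1).foldl
            (fun st i => pvStepA st (i, PySem.List.pyGetD ((PySem.Dict.ofList cf).getD "args" []) i [])) st)
        (PySem.Dict.empty, ([] : List String), (0 : Int), (65 : Int)) =
        (cfs.flatMap (fun cf => PySem.List.enumerate ((PySem.Dict.ofList cf).getD "args" []) 0)).foldl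
          pvStepA (PySem.Dict.empty, ([] : List String), (0 : Int), (65 : Int)) := by
      rw [pvFoldlFlatMap]
      exact PySem.List.foldl_congr_mem _ _ _ _ (fun st cf _ => pvInnerEnum _ st)
    rw [hA1]
    set occ := cfs.flatMap (fun cf => PySem.List.enumerate ((PySem.Dict.ofList cf).getD "args" []) 0) with hoccdef
    have hocc : occ = (cfs.map (fun cf => (PySem.Dict.ofList cf).getD "args" [])).flatMap
        (fun args => PySem.List.enumerate args 0) := by
      rw [List.flatMap_map]
    set argss := cfs.map (fun cf => (PySem.Dict.ofList cf).getD "args" []) with hargssdef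
    set R := occ.foldl pvTLStep ([] : List String) with hRdef
    set ref := occ.foldl pvStepRef (PySem.Dict.empty : PySem.Dict Int String) with hrefdef
    have hd0 : ∀ i : Int, (PySem.Dict.empty : PySem.Dict Int String).get? i =
        if 0 ≤ i ∧ i.toNat < ([] : List String).length then some (([] : List String).getD i.toNat "") else none := by
      intro i
      rw [PySem.Dict.get?_empty, if_neg (by simp)]
    have href : ∀ i : Int, ref.get? i =
        if 0 ≤ i ∧ i.toNat < R.length then some (R.getD i.toNat "") else none := by
      rw [hrefdef, hRdef, hocc]
      exact pvRefDict argss [] PySem.Dict.empty hd0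
    have houter := pvOuter argss [] PySem.Dict.empty 0 65 R (by rw [hRdef, hocc])
    rw [← hocc] at houter
    have hcong : occ.foldl (pvStepBL R) (PySem.Dict.empty, (65 : Int)) =
        occ.foldl (pvStepB ref) (PySem.Dict.empty, (65 : Int)) := by
      refine PySem.List.foldl_congr_mem _ _ _ _ ?_
      intro acc p hpmem
      have hidx : 0 ≤ p.1 ∧ p.1.toNat < R.length := by
        rw [hRdef, hocc]
        exact pvIdxLt argss [] p (by rw [← hocc]; exact hpmem)
      have hrefp : ref.get? p.1 = some (R.getD p.1.toNat "") := by
        rw [href p.1, if_pos hidx]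
      unfold pvStepBL pvStepB
      rw [PySem.Dict.getD_of_get?_eq_some ref "" hrefp]
    rw [houter, hcong]
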